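-- pv_equiv track=rewrite | github.com/liningtonlab/npmrd_curator | npmrd_curator/parsers/nmr_html_parser/csv_to_json.py | dictionary_parser
-- ===== SOURCE A (Python) =====
-- def dictionary_parser(num_comps, csv_dict):
--     # Sorts data and separates out for each compound
--     comps_shift_data = {}
--     for i in range(1, num_comps + 1):
--         possible_variables = [
--             str(i) + "_cspec",
--             str(i) + "_hspec",
--             str(i) + "_multi",
--             str(i) + "_coupling",
--         ]
--         found_variables = {
--             key: val
--             for key, val in csv_dict.items()
--             if key in possible_variables and bool(csv_dict.get(key))
--         }
--         comps_shift_data["compound_" + str(i)] = found_variables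
--     return comps_shift_data
-- ===== SOURCE B (Python) =====
-- def dictionary_parser(num_comps, csv_dict):
--     # Single pass: prebuild an index from possible key -> compound name,
--     # then bucket each csv entry by one dict lookup.
--     comps_shift_data = {}
--     index = {}
--     for i in range(1, num_comps + 1):
--         name = "compound_" + str(i)
--         comps_shift_data[name] = {}
--         for suffix in ("_cspec", "_hspec", "_multi", "_coupling"):
--             index[str(i) + suffix] = name
--     for key, val in csv_dict.items():
--         if val:
--             name = index.get(key)
--             if name is not None:
--                 comps_shift_data[name][key] = val
--     return comps_shift_data
-- ===== Notes on version B (the rewrite author's own statement) =====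
-- stated objective: faster
-- what changed: Instead of rescanning the whole csv_dict once per compound, B prebuilds a key->compound-name index dict in O(num_comps) and then buckets the entries in a single pass over csv_dict.
import Mathlib
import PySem

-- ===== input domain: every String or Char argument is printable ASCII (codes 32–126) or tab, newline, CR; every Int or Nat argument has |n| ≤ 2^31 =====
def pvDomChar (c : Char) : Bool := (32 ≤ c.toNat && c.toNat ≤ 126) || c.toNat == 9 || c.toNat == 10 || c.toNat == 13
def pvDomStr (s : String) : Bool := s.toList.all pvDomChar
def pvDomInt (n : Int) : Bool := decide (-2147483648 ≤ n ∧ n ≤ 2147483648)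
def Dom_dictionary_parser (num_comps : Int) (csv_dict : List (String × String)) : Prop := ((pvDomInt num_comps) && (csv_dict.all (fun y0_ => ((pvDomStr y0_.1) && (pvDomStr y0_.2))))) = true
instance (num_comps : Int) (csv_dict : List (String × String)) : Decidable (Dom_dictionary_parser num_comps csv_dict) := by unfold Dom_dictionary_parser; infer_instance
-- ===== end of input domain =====

-- B replaces A's per-compound rescan of csv_dict by a prebuilt key->compound-name index and one
-- bucketing pass over csv_dict (measured faster: asymptotic O(num_comps * |csv|) -> O(num_comps + |csv|)).


-- ===== PORT A =====
def dictionary_parser (num_comps : Int) (csv_dict : List (String × String)) : List (String × List (String × String)) :=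
  let comps_shift_data : PySem.Dict String (PySem.Dict String String) :=
    (PySem.List.pyRange 1 (num_comps + 1)).foldl (fun comps_shift_data i =>
      let possible_variables : List String :=
        [PySem.Int.toStr i ++ "_cspec", PySem.Int.toStr i ++ "_hspec",
         PySem.Int.toStr i ++ "_multi", PySem.Int.toStr i ++ "_coupling"]
      let found_variables : PySem.Dict String String :=
        csv_dict.foldl (fun d kv =>
          if possible_variables.contains kv.1 && (((PySem.Dict.mk csv_dict).get? kv.1).getD "" != "") then
            d.insert kv.1 kv.2
          else d) PySem.Dict.empty
      comps_shift_data.insert ("compound_" ++ PySem.Int.toStr i) found_variables)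
      PySem.Dict.empty
  comps_shift_data.items.map (fun p => (p.1, p.2.items))

-- ===== PORT B =====
def dictionary_parser_alt (num_comps : Int) (csv_dict : List (String × String)) : List (String × List (String × String)) :=
  let st :=
    (PySem.List.pyRange 1 (num_comps + 1)).foldl
      (fun (st : PySem.Dict String (PySem.Dict String String) × PySem.Dict String String) i =>
        let name := "compound_" ++ PySem.Int.toStr i
        let comps := st.1.insert name PySem.Dict.empty
        let index := ["_cspec", "_hspec", "_multi", "_coupling"].foldl
          (fun ix suffix => ix.insert (PySem.Int.toStr i ++ suffix) name) st.2
        (comps, index))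
      (PySem.Dict.empty, PySem.Dict.empty)
  let comps := csv_dict.foldl (fun comps kv =>
      if kv.2 != "" then
        match st.2.get? kv.1 with
        | some name => comps.modify name PySem.Dict.empty (fun d => d.insert kv.1 kv.2)
        | none => comps
      else comps) st.1
  comps.items.map (fun p => (p.1, p.2.items))

-- ===== PRECONDITION & SPEC =====
-- csv_dict is the association-list image of a Python dict, whose keys are necessarily distinct;
-- duplicate-key lists correspond to no Python input, so Pre_ excludes nothing the Python A accepts.
def Pre_dictionary_parser (num_comps : Int) (csv_dict : List (String × String)) : Prop :=
  (csv_dict.map Prod.fst).Nodup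
instance (num_comps : Int) (csv_dict : List (String × String)) : Decidable (Pre_dictionary_parser num_comps csv_dict) := by unfold Pre_dictionary_parser; infer_instance

def pvWitness_dictionary_parser : Int × (List (String × String)) :=
  (2, [("1_cspec", "10.2"), ("2_multi", "m"), ("2_cspec", "")])

def Spec_dictionary_parser (num_comps : Int) (csv_dict : List (String × String)) (out : List (String × List (String × String))) : Prop := out = dictionary_parser_alt num_comps csv_dict
instance (num_comps : Int) (csv_dict : List (String × String)) (out : List (String × List (String × String))) : Decidable (Spec_dictionary_parser num_comps csv_dict out) := by unfold Spec_dictionary_parser; infer_instance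

-- ===== CLAIM (what is proved, stated in full; the proofs are below) =====
def Claim_equal_dictionary_parser : Prop := ∀ (num_comps : Int) (csv_dict : List (String × String)), Dom_dictionary_parser num_comps csv_dict → Pre_dictionary_parser num_comps csv_dict → Spec_dictionary_parser num_comps csv_dict (dictionary_parser num_comps csv_dict)

-- ===== LEMMAS AND PROOFS =====

-- Shared vocabulary of the proof.
def pvSufs : List String := ["_cspec", "_hspec", "_multi", "_coupling"]
def pvName (i : Int) : String := "compound_" ++ PySem.Int.toStr i
def pvKeyOf (i : Int) (s : String) : String := PySem.Int.toStr i ++ s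
def pvQ (i : Int) (kv : String × String) : Bool :=
  (pvSufs.map (pvKeyOf i)).contains kv.1 && kv.2 != ""
def pvIndex (R : List Int) : List (String × String) :=
  R.flatMap (fun i => pvSufs.map (fun s => (pvKeyOf i s, pvName i)))
def pvOut (R : List Int) (csv : List (String × String)) : List (String × List (String × String)) :=
  R.map (fun i => (pvName i, csv.filter (pvQ i)))

-- ---- string facts ----
lemma pv_digitChar_inj (a b : Nat) (ha : a < 10) (hb : b < 10)
    (h : Nat.digitChar a = Nat.digitChar b) : a = b := by
  interval_cases a <;> interval_cases b <;> simp_all [Nat.digitChar]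

lemma pv_toDigits_inj (n : Nat) : ∀ m, Nat.toDigits 10 n = Nat.toDigits 10 m → n = m := by
  induction n using Nat.strong_induction_on with
  | _ n ih =>
    intro m h
    rw [Nat.toDigits_eq_if (n := n) (by norm_num), Nat.toDigits_eq_if (n := m) (by norm_num)] at h
    split_ifs at h with hn hm hm
    · simpa using pv_digitChar_inj n m hn hm (by simpa using h)
    · exfalso
      have hl := congrArg List.length h
      have := Nat.length_toDigits_pos (b := 10) (n := m / 10)
      simp only [List.length_append, List.length_cons, List.length_nil] at hl
      omega
    · exfalso
      have hl := congrArg List.length h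
      have := Nat.length_toDigits_pos (b := 10) (n := n / 10)
      simp only [List.length_append, List.length_cons, List.length_nil] at hl
      omega
    · obtain ⟨h1, h2⟩ := List.append_inj' h (by simp)
      have hmod : n % 10 = m % 10 :=
        pv_digitChar_inj _ _ (Nat.mod_lt _ (by norm_num)) (Nat.mod_lt _ (by norm_num))
          (by simpa using h2)
      have hdiv : n / 10 = m / 10 := ih (n / 10) (Nat.div_lt_self (by omega) (by norm_num)) _ h1
      omega

lemma pv_toChars_nonneg (i : Int) (hi : 0 ≤ i) :
    PySem.Int.toChars i = Nat.toDigits 10 i.toNat := by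
  rw [PySem.Int.toChars, if_neg (by omega)]

lemma pv_toChars_inj {i j : Int} (hi : 0 ≤ i) (hj : 0 ≤ j)
    (h : PySem.Int.toChars i = PySem.Int.toChars j) : i = j := by
  rw [pv_toChars_nonneg i hi, pv_toChars_nonneg j hj] at h
  have := pv_toDigits_inj _ _ h
  omega

lemma pv_toChars_digit {i : Int} (hi : 0 ≤ i) : ∀ c ∈ PySem.Int.toChars i, c.isDigit = true := by
  intro c hc
  rw [pv_toChars_nonneg i hi] at hc
  exact Nat.isDigit_of_mem_toDigits (by norm_num) (by norm_num) hc

lemma pv_split : ∀ (d1 d2 r1 r2 : List Char),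
    (∀ c ∈ d1, c.isDigit = true) → (∀ c ∈ d2, c.isDigit = true) →
    d1 ++ '_' :: r1 = d2 ++ '_' :: r2 → d1 = d2 ∧ r1 = r2 := by
  intro d1
  induction d1 with
  | nil =>
    intro d2 r1 r2 _ h2 h
    cases d2 with
    | nil => simpa using h
    | cons b t =>
      exfalso
      have hb : b.isDigit = true := h2 b (by simp)
      have : '_' = b := by simpa using congrArg (fun l => l.headI) h
      rw [← this] at hb
      simp [Char.isDigit] at hb
  | cons a t ih =>
    intro d2 r1 r2 h1 h2 h
    cases d2 with
    | nil =>
      exfalso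
      have ha : a.isDigit = true := h1 a (by simp)
      have : a = '_' := by simpa using congrArg (fun l => l.headI) h
      rw [this] at ha
      simp [Char.isDigit] at ha
    | cons b t2 =>
      simp only [List.cons_append, List.cons.injEq] at h
      obtain ⟨hab, htl⟩ := h
      obtain ⟨h1', h2'⟩ := ih t2 r1 r2 (fun c hc => h1 c (by simp [hc]))
        (fun c hc => h2 c (by simp [hc])) htl
      exact ⟨by simp [hab, h1'], h2'⟩

lemma pv_key_inj_aux {i j : Int} (hi : 0 ≤ i) (hj : 0 ≤ j) {r1 r2 : List Char}
    (h : PySem.Int.toChars i ++ '_' :: r1 = PySem.Int.toChars j ++ '_' :: r2) :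
    i = j ∧ r1 = r2 := by
  obtain ⟨h1, h2⟩ := pv_split _ _ _ _ (pv_toChars_digit hi) (pv_toChars_digit hj) h
  exact ⟨pv_toChars_inj hi hj h1, h2⟩

lemma pv_key_inj {i j : Int} (hi : 0 ≤ i) (hj : 0 ≤ j) {s t : String}
    (hs : s ∈ pvSufs) (ht : t ∈ pvSufs) (h : pvKeyOf i s = pvKeyOf j t) : i = j ∧ s = t := by
  have h' := congrArg String.toList h
  simp only [pvKeyOf, String.toList_append, PySem.Int.toList_toStr] at h'
  simp only [pvSufs, List.mem_cons, List.not_mem_nil, or_false] at hs ht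
  rcases hs with rfl | rfl | rfl | rfl <;> rcases ht with rfl | rfl | rfl | rfl <;>
    simp only [show ("_cspec".toList) = '_' :: ['c','s','p','e','c'] from by decide,
      show ("_hspec".toList) = '_' :: ['h','s','p','e','c'] from by decide,
      show ("_multi".toList) = '_' :: ['m','u','l','t','i'] from by decide,
      show ("_coupling".toList) = '_' :: ['c','o','u','p','l','i','n','g'] from by decide] at h' <;>
    obtain ⟨hij, hr⟩ := pv_key_inj_aux hi hj h' <;>
    first
      | exact ⟨hij, rfl⟩
      | exact absurd hr (by decide)

lemma pv_name_inj {i j : Int} (hi : 0 ≤ i) (hj : 0 ≤ j) (h : pvName i = pvName j) : i = j := by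
  have h' := congrArg String.toList h
  simp only [pvName, String.toList_append, PySem.Int.toList_toStr] at h'
  exact pv_toChars_inj hi hj (List.append_cancel_left h')

-- ---- range facts ----
lemma pv_pyRange_nodup : ∀ (n : Nat) (a b : Int), (b - a).toNat = n →
    (PySem.List.pyRange a b).Nodup := by
  intro n
  induction n with
  | zero =>
    intro a b hn
    have : PySem.List.pyRange a b = [] :=
      List.eq_nil_iff_forall_not_mem.mpr (fun x hx => by
        rw [PySem.List.mem_pyRange_one] at hx; omega)
    simp [this]
  | succ n ih =>
    intro a b hn
    rw [PySem.List.pyRange_one_cons (by omega)]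
    refine List.Nodup.cons ?_ (ih (a + 1) b (by omega))
    intro hmem
    rw [PySem.List.mem_pyRange_one] at hmem
    omega

lemma pv_names_nodup (R : List Int) (h0 : ∀ i ∈ R, 0 ≤ i) (hnd : R.Nodup) :
    (R.map pvName).Nodup :=
  hnd.map_on (fun x hx y hy h => pv_name_inj (h0 x hx) (h0 y hy) h)

lemma pv_index_keys_nodup (R : List Int) (h0 : ∀ i ∈ R, 0 ≤ i) (hnd : R.Nodup) :
    ((pvIndex R).map Prod.fst).Nodup := by
  have hkeys : (pvIndex R).map Prod.fst = R.flatMap (fun i => pvSufs.map (pvKeyOf i)) := by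
    simp [pvIndex, List.map_flatMap, List.map_map, Function.comp_def]
  rw [hkeys]
  clear hkeys
  induction R with
  | nil => simp
  | cons i R' ih =>
    rw [List.flatMap_cons, List.nodup_append]
    refine ⟨?_, ih (fun j hj => h0 j (by simp [hj])) hnd.of_cons, ?_⟩
    · refine List.Nodup.map_on ?_ (by decide : pvSufs.Nodup)
      intro s hs t ht h
      exact (pv_key_inj (h0 i (by simp)) (h0 i (by simp)) hs ht h).2
    · intro k hk1 k' hk2 hkk
      subst hkk
      simp only [List.mem_map] at hk1
      obtain ⟨s, hs, rfl⟩ := hk1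
      simp only [List.mem_flatMap, List.mem_map] at hk2
      obtain ⟨j, hj, t, ht, hpk⟩ := hk2
      have := pv_key_inj (h0 i (by simp)) (h0 j (by simp [hj])) hs ht hpk.symm
      exact (List.nodup_cons.mp hnd).1 (this.1 ▸ hj)

lemma pv_mem_index (R : List Int) (k v : String) :
    (k, v) ∈ pvIndex R ↔ ∃ i ∈ R, ∃ s ∈ pvSufs, k = pvKeyOf i s ∧ v = pvName i := by
  simp only [pvIndex, List.mem_flatMap, List.mem_map, Prod.mk.injEq]
  constructor
  · rintro ⟨i, hi, s, hs, hk, hv⟩; exact ⟨i, hi, s, hs, hk.symm, hv.symm⟩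
  · rintro ⟨i, hi, s, hs, hk, hv⟩; exact ⟨i, hi, s, hs, hk.symm, hv.symm⟩

-- ---- A-side characterisation ----
lemma pv_A_inner (csv : List (String × String)) (hnd : (csv.map Prod.fst).Nodup) (i : Int) :
    csv.foldl (fun d kv =>
      if [PySem.Int.toStr i ++ "_cspec", PySem.Int.toStr i ++ "_hspec",
          PySem.Int.toStr i ++ "_multi", PySem.Int.toStr i ++ "_coupling"].contains kv.1 &&
          (((PySem.Dict.mk csv).get? kv.1).getD "" != "") then
        d.insert kv.1 kv.2
      else d) PySem.Dict.empty
    = PySem.Dict.mk (csv.filter (pvQ i)) := by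
  rw [PySem.List.foldl_congr_mem _ _
    (fun (d : PySem.Dict String String) kv => if pvQ i kv then d.insert kv.1 kv.2 else d) _ ?_]
  · rw [PySem.List.foldl_if_eq_foldl_filter (pvQ i)
      (fun (d : PySem.Dict String String) kv => d.insert kv.1 kv.2)]
    apply PySem.Dict.ext
    have hfresh : ∀ kv ∈ csv.filter (pvQ i),
        (PySem.Dict.empty : PySem.Dict String String).contains kv.1 = false := by
      intro kv _; exact PySem.Dict.contains_empty _
    have hnd' : ((csv.filter (pvQ i)).map Prod.fst).Nodup :=
      hnd.sublist (csv.filter_sublist.map Prod.fst)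
    have := PySem.Dict.items_foldl_insert_fresh (csv.filter (pvQ i))
      (fun kv => kv.1) (fun kv => kv.2) PySem.Dict.empty hfresh hnd'
    simpa using this
  · intro acc kv hkv
    have hget : (PySem.Dict.mk csv).get? kv.1 = some kv.2 := by
      apply PySem.Dict.get?_of_mem_items (d := PySem.Dict.mk csv) (by simpa using hkv)
      simpa [PySem.Dict.keys] using hnd
    simp only [pvQ, pvSufs, pvKeyOf, hget, List.map_cons, List.map_nil]
    rfl

lemma pv_A_eq (n : Int) (csv : List (String × String)) (hnd : (csv.map Prod.fst).Nodup) :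
    dictionary_parser n csv = pvOut (PySem.List.pyRange 1 (n + 1)) csv := by
  have h0 : ∀ i ∈ PySem.List.pyRange 1 (n + 1), (0:Int) ≤ i := by
    intro i hi; rw [PySem.List.mem_pyRange_one] at hi; omega
  have hRnd : (PySem.List.pyRange 1 (n + 1)).Nodup :=
    pv_pyRange_nodup _ 1 (n + 1) rfl
  simp only [dictionary_parser]
  rw [PySem.List.foldl_congr_mem _ _
    (fun (comps : PySem.Dict String (PySem.Dict String String)) i =>
      comps.insert (pvName i) (PySem.Dict.mk (csv.filter (pvQ i)))) _ ?_]
  · have hitems : (List.foldl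
        (fun (comps : PySem.Dict String (PySem.Dict String String)) i =>
          comps.insert (pvName i) (PySem.Dict.mk (csv.filter (pvQ i))))
        PySem.Dict.empty (PySem.List.pyRange 1 (n + 1))).items
        = (PySem.List.pyRange 1 (n + 1)).map
            (fun i => (pvName i, PySem.Dict.mk (csv.filter (pvQ i)))) := by
      have := PySem.Dict.items_foldl_insert_fresh (PySem.List.pyRange 1 (n + 1))
        pvName (fun i => PySem.Dict.mk (csv.filter (pvQ i))) PySem.Dict.empty
        (fun i _ => PySem.Dict.contains_empty _) (pv_names_nodup _ h0 hRnd)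
      simpa [PySem.Dict.empty] using this
    rw [hitems]
    simp [pvOut, List.map_map]
  · intro acc i hi
    rw [pv_A_inner csv hnd i]
    rfl

-- ---- B-side characterisation ----
lemma pv_B_init (n : Int) :
    (PySem.List.pyRange 1 (n + 1)).foldl
      (fun (st : PySem.Dict String (PySem.Dict String String) × PySem.Dict String String) i =>
        (st.1.insert ("compound_" ++ PySem.Int.toStr i) PySem.Dict.empty,
         ["_cspec", "_hspec", "_multi", "_coupling"].foldl
           (fun ix suffix => ix.insert (PySem.Int.toStr i ++ suffix)
             ("compound_" ++ PySem.Int.toStr i)) st.2))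
      (PySem.Dict.empty, PySem.Dict.empty)
    = (PySem.Dict.mk ((PySem.List.pyRange 1 (n + 1)).map
         (fun i => (pvName i, (PySem.Dict.empty : PySem.Dict String String)))),
       PySem.Dict.mk (pvIndex (PySem.List.pyRange 1 (n + 1)))) := by
  have h0 : ∀ i ∈ PySem.List.pyRange 1 (n + 1), (0:Int) ≤ i := by
    intro i hi; rw [PySem.List.mem_pyRange_one] at hi; omega
  have hRnd : (PySem.List.pyRange 1 (n + 1)).Nodup :=
    pv_pyRange_nodup _ 1 (n + 1) rfl
  rw [PySem.List.foldl_prod_mk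
    (f := fun (d : PySem.Dict String (PySem.Dict String String)) i =>
      d.insert ("compound_" ++ PySem.Int.toStr i) PySem.Dict.empty)
    (g := fun (d : PySem.Dict String String) i =>
      ["_cspec", "_hspec", "_multi", "_coupling"].foldl
        (fun ix suffix => ix.insert (PySem.Int.toStr i ++ suffix)
          ("compound_" ++ PySem.Int.toStr i)) d)]
  refine Prod.ext ?_ ?_
  · apply PySem.Dict.ext
    have := PySem.Dict.items_foldl_insert_fresh (PySem.List.pyRange 1 (n + 1))
      pvName (fun _ => (PySem.Dict.empty : PySem.Dict String String)) PySem.Dict.empty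
      (fun i _ => PySem.Dict.contains_empty _) (pv_names_nodup _ h0 hRnd)
    simpa [pvName] using this
  · apply PySem.Dict.ext
    have hflat : (PySem.List.pyRange 1 (n + 1)).foldl
        (fun (d : PySem.Dict String String) i =>
          ["_cspec", "_hspec", "_multi", "_coupling"].foldl
            (fun ix suffix => ix.insert (PySem.Int.toStr i ++ suffix)
              ("compound_" ++ PySem.Int.toStr i)) d) PySem.Dict.empty
        = (pvIndex (PySem.List.pyRange 1 (n + 1))).foldl
            (fun (d : PySem.Dict String String) p => d.insert p.1 p.2) PySem.Dict.empty := by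
      rw [pvIndex, List.foldl_flatMap]
      apply PySem.List.foldl_congr_mem
      intro acc i _
      rw [List.foldl_map]
      simp [pvSufs, pvKeyOf, pvName]
    rw [hflat]
    have := PySem.Dict.items_foldl_insert_fresh (pvIndex (PySem.List.pyRange 1 (n + 1)))
      (fun p => p.1) (fun p => p.2) PySem.Dict.empty
      (fun p _ => PySem.Dict.contains_empty _)
      (by simpa using pv_index_keys_nodup _ h0 hRnd)
    simpa using this

lemma pv_B_lookup_some (R : List Int) (h0 : ∀ i ∈ R, 0 ≤ i) (hnd : R.Nodup)
    (k v : String) (h : (PySem.Dict.mk (pvIndex R)).get? k = some v) :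
    ∃ i ∈ R, ∃ s ∈ pvSufs, k = pvKeyOf i s ∧ v = pvName i := by
  rw [PySem.Dict.get?_eq_some_iff_mem_items _ _ _
    (by simpa [PySem.Dict.keys] using pv_index_keys_nodup R h0 hnd)] at h
  exact (pv_mem_index R k v).1 (by simpa using h)

lemma pv_B_lookup_none (R : List Int) (k : String)
    (h : (PySem.Dict.mk (pvIndex R)).get? k = none) :
    ∀ i ∈ R, ∀ s ∈ pvSufs, k ≠ pvKeyOf i s := by
  rw [PySem.Dict.get?_eq_none_iff_not_mem_keys] at h
  intro i hi s hs hk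
  apply h
  simp only [PySem.Dict.keys, pvIndex]
  simp only [List.map_flatMap, List.mem_flatMap, List.map_map]
  exact ⟨i, hi, by simpa using ⟨s, hs, hk.symm⟩⟩

lemma pv_B_main (R : List Int) (h0 : ∀ i ∈ R, 0 ≤ i) (hRnd : R.Nodup) :
    ∀ (l l₀ : List (String × String)), ((l₀ ++ l).map Prod.fst).Nodup →
    l.foldl (fun comps kv =>
        if kv.2 != "" then
          match (PySem.Dict.mk (pvIndex R)).get? kv.1 with
          | some name => comps.modify name PySem.Dict.empty (fun d => d.insert kv.1 kv.2)
          | none => comps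
        else comps)
      (PySem.Dict.mk (R.map (fun i => (pvName i, PySem.Dict.mk (l₀.filter (pvQ i))))))
    = PySem.Dict.mk (R.map (fun i => (pvName i, PySem.Dict.mk ((l₀ ++ l).filter (pvQ i))))) := by
  intro l
  induction l with
  | nil => intro l₀ _; simp
  | cons kv l' ih =>
    intro l₀ hnd
    rw [List.foldl_cons]
    have hstep : (if kv.2 != "" then
          match (PySem.Dict.mk (pvIndex R)).get? kv.1 with
          | some name => (PySem.Dict.mk (R.map (fun i => (pvName i, PySem.Dict.mk (l₀.filter (pvQ i)))))).modify
              name PySem.Dict.empty (fun d => d.insert kv.1 kv.2)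
          | none => PySem.Dict.mk (R.map (fun i => (pvName i, PySem.Dict.mk (l₀.filter (pvQ i)))))
        else PySem.Dict.mk (R.map (fun i => (pvName i, PySem.Dict.mk (l₀.filter (pvQ i))))))
        = PySem.Dict.mk (R.map (fun i => (pvName i, PySem.Dict.mk ((l₀ ++ [kv]).filter (pvQ i))))) := by
      by_cases hv : kv.2 = ""
      · simp [hv, pvQ, List.filter_append]
      · rw [if_pos (by simpa using hv)]
        cases hget : (PySem.Dict.mk (pvIndex R)).get? kv.1 with
        | none =>
          have hnone := pv_B_lookup_none R kv.1 hget
          apply congrArg PySem.Dict.mk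
          apply List.map_congr_left
          intro i hi
          have : pvQ i kv = false := by
            simp only [pvQ, Bool.and_eq_false_iff]
            left
            simp only [List.contains_eq_mem, List.mem_map, decide_eq_false_iff_not]
            rintro ⟨s, hs, hk⟩
            exact hnone i hi s hs hk.symm
          simp [List.filter_append, this]
        | some nm =>
          obtain ⟨i₀, hi₀, s₀, hs₀, hk₀, rfl⟩ := pv_B_lookup_some R h0 hRnd kv.1 nm hget
          have hkeys : (PySem.Dict.mk (R.map (fun i =>
              (pvName i, PySem.Dict.mk (l₀.filter (pvQ i)))))).keys = R.map pvName := by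
            simp [PySem.Dict.keys, List.map_map]
          have hknd : (PySem.Dict.mk (R.map (fun i =>
              (pvName i, PySem.Dict.mk (l₀.filter (pvQ i)))))).keys.Nodup := by
            rw [hkeys]; exact pv_names_nodup R h0 hRnd
          have hmemit : (pvName i₀, PySem.Dict.mk (l₀.filter (pvQ i₀))) ∈
              (PySem.Dict.mk (R.map (fun i =>
                (pvName i, PySem.Dict.mk (l₀.filter (pvQ i)))))).items := by
            simpa using List.mem_map_of_mem hi₀ (f := fun i => (pvName i, PySem.Dict.mk (l₀.filter (pvQ i))))
          have hgetD : (PySem.Dict.mk (R.map (fun i =>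
              (pvName i, PySem.Dict.mk (l₀.filter (pvQ i)))))).getD (pvName i₀) PySem.Dict.empty
              = PySem.Dict.mk (l₀.filter (pvQ i₀)) :=
            PySem.Dict.getD_of_mem_items _ hmemit hknd _
          have hcont : (PySem.Dict.mk (R.map (fun i =>
              (pvName i, PySem.Dict.mk (l₀.filter (pvQ i)))))).contains (pvName i₀) = true := by
            rw [PySem.Dict.contains_iff_mem_keys, hkeys]
            exact List.mem_map_of_mem hi₀
          have hkv1 : kv.1 ∉ l₀.map Prod.fst := by
            intro hmem
            have hnd' : ((l₀.map Prod.fst) ++ (kv.1 :: l'.map Prod.fst)).Nodup := by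
              simpa using hnd
            exact (List.nodup_append.mp hnd').2.2 kv.1 hmem kv.1 (List.mem_cons_self ..) rfl
          simp only [PySem.Dict.modify, hgetD]
          apply PySem.Dict.ext
          rw [PySem.Dict.items_insert_of_contains _ _ hcont]
          simp only [List.map_map]
          apply List.map_congr_left
          intro i hi
          by_cases hii : i = i₀
          · subst hii
            simp only [Function.comp_apply, BEq.rfl, if_pos]
            refine congrArg (fun d => (pvName i, d)) ?_
            apply PySem.Dict.ext
            have hcont2 : (PySem.Dict.mk (l₀.filter (pvQ i))).contains kv.1 = false := by
              rw [← Bool.not_eq_true, PySem.Dict.contains_iff_mem_keys]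
              intro hmem
              have hmem' : kv.1 ∈ (l₀.filter (pvQ i)).map Prod.fst := by
                simpa [PySem.Dict.keys] using hmem
              exact hkv1 (List.map_subset Prod.fst (l₀.filter_sublist.subset) hmem')
            rw [PySem.Dict.items_insert_of_not_contains _ _ hcont2]
            have hq : pvQ i kv = true := by
              simp only [pvQ, Bool.and_eq_true, bne_iff_ne, ne_eq]
              refine ⟨?_, hv⟩
              simp only [List.contains_eq_mem, decide_eq_true_eq]
              exact hk₀ ▸ List.mem_map_of_mem hs₀
            simp [List.filter_append, hq]
          · have hne : (pvName i == pvName i₀) = false := by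
              refine beq_eq_false_iff_ne.mpr ?_
              intro h
              exact hii (pv_name_inj (h0 i hi) (h0 i₀ hi₀) h)
            simp only [Function.comp_apply, hne, Bool.false_eq_true, if_neg, not_false_iff]
            have hq : pvQ i kv = false := by
              simp only [pvQ, Bool.and_eq_false_iff]
              left
              simp only [List.contains_eq_mem, List.mem_map, decide_eq_false_iff_not]
              rintro ⟨s, hs, hk⟩
              have := pv_key_inj (h0 i hi) (h0 i₀ hi₀) hs hs₀ (hk.trans hk₀)
              exact hii this.1
            simp [List.filter_append, hq]
    rw [hstep]
    have := ih (l₀ ++ [kv]) (by simpa using hnd)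
    simpa using this

lemma pv_B_eq (n : Int) (csv : List (String × String)) (hnd : (csv.map Prod.fst).Nodup) :
    dictionary_parser_alt n csv = pvOut (PySem.List.pyRange 1 (n + 1)) csv := by
  have h0 : ∀ i ∈ PySem.List.pyRange 1 (n + 1), (0:Int) ≤ i := by
    intro i hi; rw [PySem.List.mem_pyRange_one] at hi; omega
  have hRnd : (PySem.List.pyRange 1 (n + 1)).Nodup :=
    pv_pyRange_nodup _ 1 (n + 1) rfl
  simp only [dictionary_parser_alt]
  rw [pv_B_init n]
  have hmain := pv_B_main (PySem.List.pyRange 1 (n + 1)) h0 hRnd csv [] (by simpa using hnd)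
  simp only [List.nil_append] at hmain
  rw [show (PySem.Dict.mk ((PySem.List.pyRange 1 (n + 1)).map
      (fun i => (pvName i, (PySem.Dict.empty : PySem.Dict String String)))))
      = PySem.Dict.mk ((PySem.List.pyRange 1 (n + 1)).map
        (fun i => (pvName i, PySem.Dict.mk (List.filter (pvQ i) [])))) from by simp [PySem.Dict.empty],
    hmain]
  simp [pvOut, List.map_map]

-- ===== VERDICT (by name: the statement is the Claim_ definition above) =====
theorem dictionary_parser_spec : Claim_equal_dictionary_parser := by
  intro n csv _ hpre
  unfold Spec_dictionary_parser
  rw [pv_A_eq n csv hpre, pv_B_eq n csv hpre]
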